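-- pv_equiv track=rewrite | github.com/mariamturner/Doc-Classification | classify.py | get_vocabulary
-- ===== SOURCE A (Python) =====
-- def get_vocabulary(D):
--     """
--     Given a list of documents, where each document is represented as
--     a list of tokens, return the resulting vocabulary. The vocabulary
--     should be a set of tokens which appear more than once in the entire
--     document collection plus the "<unk>" token.
--     """
--     once = set()
--     tokens = set()
--     for doc in D:
--         for token in doc:
--             if token in once: tokens.add(token)
--             else: once.add(token)
--     tokens.add("<unk>")
--     return tokens
-- ===== SOURCE B (Python) =====
-- def get_vocabulary(D):
--     """
--     Given a list of documents (each a list of tokens), return the set of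
--     tokens appearing more than once in the whole collection, plus "<unk>".
--     Strategy: flatten to one token stream, record each token's first
--     position in one indexing pass, then in a second pass keep every token
--     standing strictly after the first occurrence of its own value.
--     """
--     stream = [t for doc in D for t in doc]
--     first = {}
--     for i, t in enumerate(stream):
--         first.setdefault(t, i)
--     vocab = {t for i, t in enumerate(stream) if first[t] < i}
--     vocab.add("<unk>")
--     return vocab
-- ===== Notes on version B (the rewrite author's own statement) =====
-- stated objective: alternative
-- what changed: B flattens the documents into one token stream and works in two staged passes: a setdefault pass records each token's first position in a dict, then a set comprehension keeps every token standing strictly after the first occurrence of its value, replacing A's interleaved nested loops over two incremental membership sets with position arithmetic.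
import Mathlib
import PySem

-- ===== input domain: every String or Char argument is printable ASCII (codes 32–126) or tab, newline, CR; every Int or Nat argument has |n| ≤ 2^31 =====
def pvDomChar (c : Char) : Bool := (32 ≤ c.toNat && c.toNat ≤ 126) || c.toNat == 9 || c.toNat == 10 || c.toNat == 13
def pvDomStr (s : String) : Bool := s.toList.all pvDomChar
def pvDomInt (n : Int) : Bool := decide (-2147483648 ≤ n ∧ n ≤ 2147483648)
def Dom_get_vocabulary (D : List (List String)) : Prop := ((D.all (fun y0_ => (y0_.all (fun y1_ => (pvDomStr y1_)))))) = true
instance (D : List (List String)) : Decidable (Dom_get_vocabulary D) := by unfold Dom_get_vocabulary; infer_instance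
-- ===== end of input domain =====

-- B replaces A's interleaved one-pass first-seen/second-seen set tracking by two staged
-- passes over the flattened stream: index each token's first position, then keep every
-- token standing strictly after the first occurrence of its value (alternative, not faster).

-- ===== PORT A =====
-- state = (once, tokens), the two Python sets
def pvStepA (st : PySem.Set String × PySem.Set String) (token : String) :
    PySem.Set String × PySem.Set String :=
  if PySem.Set.contains st.1 token then (st.1, PySem.Set.add st.2 token)
  else (PySem.Set.add st.1 token, st.2)

def get_vocabulary (D : List (List String)) : List String :=
  let st := D.foldl (fun st doc => doc.foldl pvStepA st) (PySem.Set.empty, PySem.Set.empty)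
  PySem.Set.add st.2 "<unk>"

-- ===== PORT B =====
-- pass 1: first = {}; for i, t in enumerate(stream): first.setdefault(t, i)
def pvFirst (stream : List String) : PySem.Dict String Int :=
  (PySem.List.enumerate stream 0).foldl
    (fun d p => PySem.Dict.setdefault d p.2 p.1) PySem.Dict.empty

-- pass 2, the set-comprehension body: t enters the set iff first[t] < i
def pvStepB (first : PySem.Dict String Int) (v : PySem.Set String) (p : Int × String) :
    PySem.Set String :=
  match PySem.Dict.get? first p.2 with
  | some j => if j < p.1 then PySem.Set.add v p.2 else v
  | none => v -- first[t] would raise KeyError; unreachable: every stream token is a key of first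

def get_vocabulary_alt (D : List (List String)) : List String :=
  let stream := D.flatMap (fun doc => doc)
  let first := pvFirst stream
  let vocab := (PySem.List.enumerate stream 0).foldl (pvStepB first) PySem.Set.empty
  PySem.Set.add vocab "<unk>"

-- ===== PRECONDITION & SPEC =====
def Spec_get_vocabulary (D : List (List String)) (out : List String) : Prop := out = get_vocabulary_alt D
instance (D : List (List String)) (out : List String) : Decidable (Spec_get_vocabulary D out) := by unfold Spec_get_vocabulary; infer_instance

-- ===== CLAIM (what is proved, stated in full; the proofs are below) =====
def Claim_equal_get_vocabulary : Prop := ∀ (D : List (List String)), Dom_get_vocabulary D → Spec_get_vocabulary D (get_vocabulary D)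

-- ===== LEMMAS AND PROOFS =====

-- the setdefault pass computes exactly the index of each token's first occurrence
theorem pvFirst_aux (S : List String) (s : Int) (d : PySem.Dict String Int) (t : String) :
    PySem.Dict.get?
        ((PySem.List.enumerate S s).foldl (fun d p => PySem.Dict.setdefault d p.2 p.1) d) t
      = if d.contains t then d.get? t
        else Option.map (fun (j : Nat) => s + (j : Int)) (PySem.List.index? S t) := by
  induction S generalizing s d with
  | nil =>
    by_cases h : d.contains t
    · simp [PySem.List.enumerate, h]
    · have h' : d.contains t = false := by simpa using h
      simp [PySem.List.enumerate, h', (PySem.Dict.get?_eq_none_iff_contains d t).2 h']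
  | cons x S ih =>
    rw [PySem.List.enumerate_cons, List.foldl_cons]
    have hred : PySem.Dict.setdefault d (s, x).2 (s, x).1 = PySem.Dict.setdefault d x s := rfl
    rw [hred, ih]
    by_cases hx : x = t
    · subst hx
      rw [if_pos (by simp [PySem.Dict.contains_setdefault])]
      rw [PySem.Dict.get?_setdefault_self, PySem.List.index?_cons_self]
      by_cases h : d.contains x
      · rw [if_pos h]
        obtain ⟨v, hv⟩ := Option.isSome_iff_exists.1
          ((PySem.Dict.contains_eq_isSome_get? d x) ▸ h)
        simp [hv]
      · have h' : d.contains x = false := by simpa using h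
        rw [if_neg (by simp [h']), (PySem.Dict.get?_eq_none_iff_contains d x).2 h']
        simp
    · rw [PySem.Dict.get?_setdefault_of_ne d s (Ne.symm hx)]
      rw [PySem.Dict.contains_setdefault]
      have hbe : (t == x) = false := beq_eq_false_iff_ne.mpr (Ne.symm hx)
      rw [hbe, Bool.false_or, PySem.List.index?_cons_of_ne S hx]
      by_cases h : d.contains t
      · rw [if_pos h, if_pos h]
      · rw [if_neg h, if_neg h]
        cases hidx : PySem.List.index? S t with
        | none => simp
        | some j =>
          simp only [Option.map_some]
          congr 1
          push_cast
          ring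

theorem pvFirst_get? (S : List String) (t : String) :
    PySem.Dict.get? (pvFirst S) t
      = Option.map (fun (j : Nat) => (j : Int)) (PySem.List.index? S t) := by
  rw [pvFirst, pvFirst_aux]
  rw [if_neg (by simp [PySem.Dict.contains_empty])]
  cases hidx : PySem.List.index? S t with
  | none => simp
  | some j => simp

-- stream.index(t) < k iff t occurs in the strict prefix stream[:k]
theorem pv_first_lt (S : List String) (t : String) (k j : Nat)
    (hj : PySem.List.index? S t = some j) : j < k ↔ t ∈ S.take k := by
  obtain ⟨hjlen, hget, hmin⟩ := PySem.List.getElem_of_index?_eq_some hj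
  constructor
  · intro hjk
    have hjt : j < (S.take k).length := by simp [List.length_take]; omega
    have : (S.take k)[j] = t := by rw [List.getElem_take]; exact hget
    exact this ▸ List.getElem_mem hjt
  · intro hmem
    obtain ⟨i, hi, hit⟩ := List.mem_iff_getElem.1 hmem
    have hik : i < k := by have := List.length_take (l := S) (i := k); omega
    have hiS : i < S.length := by have := List.length_take (l := S) (i := k); omega
    have hSi : S[i] = t := by rw [← List.getElem_take (h := hi)]; exact hit
    by_contra hjk
    exact hmin i (by omega) hSi

-- loop invariant relating A's suffix pass (with `once` = tokens of the processed prefix)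
-- to B's enumerated pass over the same suffix of the stream S
theorem pv_core (S : List String) (L : List String) (k : Nat) (once tokens : PySem.Set String)
    (hdrop : S.drop k = L)
    (hmem : ∀ u, u ∈ once ↔ u ∈ S.take k) :
    (L.foldl pvStepA (once, tokens)).2
      = (PySem.List.enumerate L (k : Int)).foldl (pvStepB (pvFirst S)) tokens := by
  induction L generalizing k once tokens with
  | nil => simp [PySem.List.enumerate]
  | cons t L ih =>
    have hk : S[k]? = some t := by
      rw [← List.head?_drop, hdrop]; rfl
    have hdrop' : S.drop (k + 1) = L := by
      rw [← List.tail_drop, hdrop]; rfl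
    have htake : S.take (k + 1) = S.take k ++ [t] := by
      rw [List.take_add_one, hk]; rfl
    rw [PySem.List.enumerate_cons, List.foldl_cons, List.foldl_cons]
    have htS : t ∈ S := List.mem_of_mem_drop (l := S) (i := k)
      (by rw [hdrop]; exact List.mem_cons_self)
    obtain ⟨j, hj⟩ := Option.isSome_iff_exists.1 ((PySem.List.index?_isSome_iff S t).2 htS)
    have hcond : PySem.Set.contains once t = (S.take k).contains t := by
      by_cases h : t ∈ S.take k
      · simp [(hmem t).2 h, h]
      · have h1 : t ∉ once := fun hh => h ((hmem t).1 hh)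
        simp [h, h1]
    by_cases h : t ∈ S.take k
    · have hA : pvStepA (once, tokens) t = (once, PySem.Set.add tokens t) := by
        simp only [pvStepA]
        rw [if_pos (by rw [hcond]; simp [h])]
      have hB : pvStepB (pvFirst S) tokens ((k : Int), t) = PySem.Set.add tokens t := by
        have hjk : j < k := (pv_first_lt S t k j hj).2 h
        have hc : ((j : Nat) : Int) < ((k : Nat) : Int) := by exact_mod_cast hjk
        simp only [pvStepB]
        rw [pvFirst_get?, hj, Option.map_some]
        exact if_pos hc
      rw [hA, hB]
      have := ih (k + 1) once (PySem.Set.add tokens t) hdrop'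
        (fun u => by
          rw [htake]
          constructor
          · intro hu; exact List.mem_append.2 (Or.inl ((hmem u).1 hu))
          · intro hu
            rcases List.mem_append.1 hu with hu | hu
            · exact (hmem u).2 hu
            · simp at hu; subst hu; exact (hmem u).2 h)
      rw [this]; push_cast; ring_nf
    · have hA : pvStepA (once, tokens) t = (PySem.Set.add once t, tokens) := by
        simp only [pvStepA]
        rw [if_neg (by rw [hcond]; simp [h])]
      have hB : pvStepB (pvFirst S) tokens ((k : Int), t) = tokens := by
        have hjk : ¬ j < k := fun hh => h ((pv_first_lt S t k j hj).1 hh)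
        have hc : ¬ ((j : Nat) : Int) < ((k : Nat) : Int) := by exact_mod_cast hjk
        simp only [pvStepB]
        rw [pvFirst_get?, hj, Option.map_some]
        exact if_neg hc
      rw [hA, hB]
      have := ih (k + 1) (PySem.Set.add once t) tokens hdrop'
        (fun u => by
          rw [htake, PySem.Set.mem_add]
          constructor
          · intro hu
            rcases hu with hu | hu
            · exact List.mem_append.2 (Or.inl ((hmem u).1 hu))
            · subst hu; exact List.mem_append.2 (Or.inr (by simp))
          · intro hu
            rcases List.mem_append.1 hu with hu | hu
            · exact Or.inl ((hmem u).2 hu)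
            · simp at hu; exact Or.inr hu)
      rw [this]; push_cast; ring_nf

-- ===== VERDICT (by name: the statement is the Claim_ definition above) =====
theorem get_vocabulary_spec : Claim_equal_get_vocabulary := by
  intro D _
  unfold Spec_get_vocabulary get_vocabulary get_vocabulary_alt
  have hflat : D.flatMap (fun doc => doc) = D.flatten := by simp
  have hnest :
      D.foldl (fun st doc => doc.foldl pvStepA st) (PySem.Set.empty, PySem.Set.empty)
        = D.flatten.foldl pvStepA (PySem.Set.empty, PySem.Set.empty) := by
    rw [List.foldl_flatten]
  simp only [hflat, hnest]
  have := pv_core D.flatten D.flatten 0 PySem.Set.empty PySem.Set.empty rfl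
    (fun u => by simp [PySem.Set.empty])
  exact congrArg (fun s => PySem.Set.add s "<unk>") this
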